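-- pv_equiv track=rewrite | github.com/pypi-data/pypi-mirror-401 | packages/regscale-cli/regscale_cli-6.29.4.12-py3-none-any.whl/regscale/integrations/public/fedramp/fedramp_five.py | _is_ports_table
-- ===== SOURCE A (Python) =====
-- from typing import Any, Dict, List, Optional, Tuple, Union
--
-- def _is_ports_table(key: str, merged_dict: Dict[str, str]) -> bool:
--     """
--     Check if this is a ports and protocols table using flexible matching.
--
--     :param str key: The preceding text key.
--     :param Dict[str, str] merged_dict: The merged dictionary of the table data.
--     :return: True if this appears to be a ports and protocols table.
--     :rtype: bool
--     """
--     # Variations of table headers in FedRAMP templates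
--     table_header_patterns = [
--         "services, ports, and protocols",
--         "ports and protocols",
--         "network ports",
--         "port table",
--         "table 9-1",  # FedRAMP v5 standard table number
--         "table 9.1",
--         "ports & protocols",
--         "ports, protocols",
--         "system ports",
--         "boundary ports",
--         "external ports",
--         "internal ports",
--         "firewall ports",
--     ]
--     key_lower = (key or "").lower()
--
--     # Check if the table header matches any pattern
--     header_match = any(pattern in key_lower for pattern in table_header_patterns)
--
--     # Variations of port column names - more flexible matching
--     port_column_patterns = ["port #", "port", "port number", "ports", "port range", "start port", "end port"]
--     merged_keys_lower = [k.lower() for k in merged_dict.keys()]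
--
--     # Check for exact or partial port column matches
--     port_column_match = any(any(pattern in col for pattern in port_column_patterns) for col in merged_keys_lower)
--
--     # Also check for protocol column as secondary indicator (table with protocol likely has ports)
--     protocol_patterns = ["protocol", "transport", "tcp/udp", "tcp", "udp"]
--     protocol_match = any(any(pattern in col for pattern in protocol_patterns) for col in merged_keys_lower)
--
--     # Service column as additional indicator
--     service_patterns = ["service", "service name", "application"]
--     service_match = any(any(pattern in col for pattern in service_patterns) for col in merged_keys_lower)
--
--     # If header matches, just need port column
--     if header_match and port_column_match:
--         return True
--
--     # If no header but table has port + protocol columns, likely a ports table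
--     if port_column_match and protocol_match:
--         return True
--
--     # If table has service + protocol + some numeric-looking column, might be ports table
--     if service_match and protocol_match and port_column_match:
--         return True
--
--     return False
-- ===== SOURCE B (Python) =====
-- _HEADERS = (
--     "services, ports, and protocols", "ports and protocols", "network ports",
--     "port table", "table 9-1", "table 9.1", "ports & protocols",
--     "ports, protocols", "system ports", "boundary ports", "external ports",
--     "internal ports", "firewall ports",
-- )
--
--
-- def _is_ports_table(key, merged_dict):
--     """Pattern-set reduction: every one of A's seven port-column patterns contains
--     'port' and 'port' is itself one of them, so the port scan collapses to a single
--     'port' substring test; 'tcp/udp' contains 'tcp', so the protocol set collapses to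
--     four tokens; A's service branch is subsumed by its second branch.  Early returns
--     stage the checks so the header/protocol work runs only when a port column exists."""
--     if not any("port" in k.lower() for k in merged_dict):
--         return False
--     lk = (key or "").lower()
--     if any(h in lk for h in _HEADERS):
--         return True
--     return any(t in k.lower() for k in merged_dict for t in ("protocol", "transport", "tcp", "udp"))
-- ===== Notes on version B (the rewrite author's own statement) =====
-- stated objective: simpler
-- what changed: Replaces A's four staged any-any pattern scans and three-branch return by a pattern-set reduction with early returns: the seven port patterns collapse to the single substring test 'port' (each pattern contains 'port' and 'port' is itself a pattern), 'tcp/udp' collapses into 'tcp', the redundant service scan is dropped, and the header/protocol checks run only after a port column is found.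
import Mathlib
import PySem

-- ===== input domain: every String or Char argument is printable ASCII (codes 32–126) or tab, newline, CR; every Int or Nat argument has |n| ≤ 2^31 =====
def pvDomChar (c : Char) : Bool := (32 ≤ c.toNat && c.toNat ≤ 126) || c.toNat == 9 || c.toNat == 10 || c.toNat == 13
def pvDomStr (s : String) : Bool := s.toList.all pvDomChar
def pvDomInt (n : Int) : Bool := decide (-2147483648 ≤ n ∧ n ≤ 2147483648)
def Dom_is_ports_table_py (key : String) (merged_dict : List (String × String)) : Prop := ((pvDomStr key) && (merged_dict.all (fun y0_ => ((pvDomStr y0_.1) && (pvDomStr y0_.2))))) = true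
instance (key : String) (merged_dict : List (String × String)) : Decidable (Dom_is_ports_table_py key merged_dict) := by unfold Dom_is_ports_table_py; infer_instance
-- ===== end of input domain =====

-- B replaces A's four staged any-any pattern scans and three-branch return with a pattern-set
-- reduction (the seven port patterns collapse to the single substring 'port', 'tcp/udp' into 'tcp',
-- the service scan is subsumed) staged behind early returns; objective: simpler.


-- ===== PORT A =====
def is_ports_table_py (key : String) (merged_dict : List (String × String)) : Bool :=
  let table_header_patterns : List String :=
    ["services, ports, and protocols", "ports and protocols", "network ports",
     "port table", "table 9-1", "table 9.1", "ports & protocols",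
     "ports, protocols", "system ports", "boundary ports", "external ports",
     "internal ports", "firewall ports"]
  -- (key or "").lower()
  let key_lower := PySem.Str.lower (if key == "" then "" else key)
  let header_match := table_header_patterns.any (fun pattern => PySem.Str.isIn pattern key_lower)
  let port_column_patterns : List String :=
    ["port #", "port", "port number", "ports", "port range", "start port", "end port"]
  let merged_keys_lower := merged_dict.map (fun kv => PySem.Str.lower kv.1)
  let port_column_match :=
    merged_keys_lower.any (fun col => port_column_patterns.any (fun pattern => PySem.Str.isIn pattern col))
  let protocol_patterns : List String := ["protocol", "transport", "tcp/udp", "tcp", "udp"]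
  let protocol_match :=
    merged_keys_lower.any (fun col => protocol_patterns.any (fun pattern => PySem.Str.isIn pattern col))
  let service_patterns : List String := ["service", "service name", "application"]
  let service_match :=
    merged_keys_lower.any (fun col => service_patterns.any (fun pattern => PySem.Str.isIn pattern col))
  if header_match && port_column_match then true
  else if port_column_match && protocol_match then true
  else if service_match && protocol_match && port_column_match then true
  else false

-- ===== PORT B =====
def pvHeaders : List String :=
  ["services, ports, and protocols", "ports and protocols", "network ports",
   "port table", "table 9-1", "table 9.1", "ports & protocols",
   "ports, protocols", "system ports", "boundary ports", "external ports",
   "internal ports", "firewall ports"]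

def is_ports_table_py_alt (key : String) (merged_dict : List (String × String)) : Bool :=
  if !(merged_dict.any (fun kv => PySem.Str.isIn "port" (PySem.Str.lower kv.1))) then false
  else
    let lk := PySem.Str.lower (if key == "" then "" else key)
    if pvHeaders.any (fun h => PySem.Str.isIn h lk) then true
    else merged_dict.any (fun kv =>
      (["protocol", "transport", "tcp", "udp"] : List String).any
        (fun t => PySem.Str.isIn t (PySem.Str.lower kv.1)))

-- ===== PRECONDITION & SPEC =====
def Spec_is_ports_table_py (key : String) (merged_dict : List (String × String)) (out : Bool) : Prop := out = is_ports_table_py_alt key merged_dict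
instance (key : String) (merged_dict : List (String × String)) (out : Bool) : Decidable (Spec_is_ports_table_py key merged_dict out) := by unfold Spec_is_ports_table_py; infer_instance

-- ===== CLAIM (what is proved, stated in full; the proofs are below) =====
def Claim_equal_is_ports_table_py : Prop := ∀ (key : String) (merged_dict : List (String × String)), Dom_is_ports_table_py key merged_dict → Spec_is_ports_table_py key merged_dict (is_ports_table_py key merged_dict)

-- ===== LEMMAS AND PROOFS =====

-- the seven-pattern port scan of a column collapses to the single substring test "port"
theorem pvPortCollapse (col : String) :
    (["port #", "port", "port number", "ports", "port range", "start port", "end port"] :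
        List String).any (fun pattern => PySem.Str.isIn pattern col)
      = PySem.Str.isIn "port" col := by
  apply Bool.eq_iff_iff.mpr
  simp only [List.any_eq_true]
  constructor
  · rintro ⟨p, hp, hfp⟩
    rw [PySem.Str.isIn_iff_infix] at hfp ⊢
    have hsub : ("port" : String).toList <:+: p.toList := by
      simp only [List.mem_cons, List.not_mem_nil, or_false] at hp
      rcases hp with rfl | rfl | rfl | rfl | rfl | rfl | rfl <;> decide
    exact hsub.trans hfp
  · intro h
    exact ⟨"port", by decide, h⟩

-- "tcp/udp" contains "tcp", so the five protocol patterns collapse to four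
theorem pvProtocolCollapse (col : String) :
    (["protocol", "transport", "tcp/udp", "tcp", "udp"] : List String).any
        (fun pattern => PySem.Str.isIn pattern col)
      = (["protocol", "transport", "tcp", "udp"] : List String).any
        (fun t => PySem.Str.isIn t col) := by
  apply Bool.eq_iff_iff.mpr
  simp only [List.any_eq_true]
  constructor
  · rintro ⟨p, hp, hfp⟩
    simp only [List.mem_cons, List.not_mem_nil, or_false] at hp
    rcases hp with rfl | rfl | rfl | rfl | rfl
    · exact ⟨"protocol", by decide, hfp⟩
    · exact ⟨"transport", by decide, hfp⟩
    · refine ⟨"tcp", by decide, ?_⟩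
      rw [PySem.Str.isIn_iff_infix] at hfp ⊢
      exact List.IsInfix.trans (by decide) hfp
    · exact ⟨"tcp", by decide, hfp⟩
    · exact ⟨"udp", by decide, hfp⟩
  · rintro ⟨p, hp, hfp⟩
    simp only [List.mem_cons, List.not_mem_nil, or_false] at hp
    rcases hp with rfl | rfl | rfl | rfl
    · exact ⟨"protocol", by decide, hfp⟩
    · exact ⟨"transport", by decide, hfp⟩
    · exact ⟨"tcp", by decide, hfp⟩
    · exact ⟨"udp", by decide, hfp⟩

-- A's three-branch return, as pure boolean algebra (the service branch is subsumed)
theorem pvBoolAlgebra (h p q s : Bool) :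
    (if h && p then true
     else if p && q then true
     else if s && q && p then true
     else false) = (if !p then false else if h then true else q) := by
  cases h <;> cases p <;> cases q <;> cases s <;> rfl

-- ===== VERDICT (by name: the statement is the Claim_ definition above) =====
theorem is_ports_table_py_spec : Claim_equal_is_ports_table_py := by
  intro key merged_dict _
  unfold Spec_is_ports_table_py is_ports_table_py is_ports_table_py_alt
  simp only [pvHeaders, List.any_map, Function.comp_def, pvPortCollapse, pvProtocolCollapse]
  exact pvBoolAlgebra _ _ _ _
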